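-- pv_equiv track=rewrite | github.com/WiekeHarmsen/fluency-features-ASR-IS2025 | asr_prompt_aligners/stories-align-prompt-whispert-confStartEnd.py | makeSplit
-- ===== SOURCE A (Python) =====
-- def makeSplit(targetPartsList, origPartsList, target_text, original_text, original_space_idx, max_length):
--
--     # Get slice to split on
--     original_slice = original_text[original_space_idx-3:original_space_idx+3]
--
--     # Find slice in target text
--     target_slice_idx = target_text.find(original_slice)
--
--     # If slice is found in target text
--     if (target_slice_idx != -1 and target_slice_idx < original_space_idx+200 and len(original_slice) != 0):
--
--         # Split the target_text and original_text on the space in the overlapping slice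
--         # Add the first part to the partLists
--         target_space_idx = target_slice_idx+3
--         targetPartsList.append(target_text[:target_space_idx])
--         origPartsList.append(original_text[:original_space_idx])
--
--         # Remove the first part from the target_text and original_text
--         target_text = target_text[target_space_idx+1:]
--         original_text = original_text[original_space_idx+1:]
--
--         if (len(original_text) < 80 or len(target_text) < 80):
--             # End of file reached
--             targetPartsList.append(target_text)
--             origPartsList.append(original_text)
--             target_text = ''
--             original_text = ''
--             idx_of_next_space = -1
--
--             return targetPartsList, origPartsList, target_text, original_text, idx_of_next_space, max_length
--         else:
--             # reset around_idx
--             new_space_idx = original_text.find(" ", max_length)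
--
--             # make next split
--             return makeSplit(targetPartsList, origPartsList, target_text, original_text, new_space_idx, max_length)
--
--     # If slice is not found in target text
--     else:
--         # reset around_idx to next space
--         idx_of_next_space = original_text.find(" ", original_space_idx+1)
--         if (idx_of_next_space == -1):
--             # End of file reached
--             targetPartsList.append(target_text)
--             origPartsList.append(original_text)
--             return targetPartsList, origPartsList, target_text, original_text, idx_of_next_space, max_length
--         else:
--             return makeSplit(targetPartsList, origPartsList, target_text, original_text, idx_of_next_space, max_length)
-- ===== SOURCE B (Python) =====
-- def _clamp(m, k):
--     # Python slice-endpoint normalisation for a sequence of length m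
--     if k < 0:
--         k += m
--     if k < 0:
--         return 0
--     return m if k > m else k
--
-- def makeSplit(targetPartsList, origPartsList, target_text, original_text, original_space_idx, max_length):
--     # Offset-based loop: keep cursors t0/o0 into the two immutable input strings
--     # instead of re-slicing the remaining texts on every step.
--     tn = len(target_text)
--     on = len(original_text)
--     t0 = 0
--     o0 = 0
--     idx = original_space_idx
--     while True:
--         om = on - o0
--         lo = _clamp(om, idx - 3)
--         hi = _clamp(om, idx + 3)
--         piece = original_text[o0 + lo:o0 + hi]
--         j = target_text.find(piece, t0)
--         t = j - t0 if j != -1 else -1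
--         if piece and t != -1 and t < idx + 200:
--             targetPartsList.append(target_text[t0:t0 + _clamp(tn - t0, t + 3)])
--             origPartsList.append(original_text[o0:o0 + _clamp(om, idx)])
--             t0 += _clamp(tn - t0, t + 4)
--             o0 += _clamp(om, idx + 1)
--             if on - o0 < 80 or tn - t0 < 80:
--                 targetPartsList.append(target_text[t0:])
--                 origPartsList.append(original_text[o0:])
--                 return targetPartsList, origPartsList, '', '', -1, max_length
--             k = original_text.find(' ', o0 + _clamp(on - o0, max_length))
--             idx = k - o0 if k != -1 else -1
--         else:
--             k = original_text.find(' ', o0 + _clamp(om, idx + 1))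
--             nxt = k - o0 if k != -1 else -1
--             if nxt == -1:
--                 targetPartsList.append(target_text[t0:])
--                 origPartsList.append(original_text[o0:])
--                 return targetPartsList, origPartsList, target_text[t0:], original_text[o0:], -1, max_length
--             idx = nxt
-- ===== Notes on version B (the rewrite author's own statement) =====
-- stated objective: alternative
-- what changed: A recursively re-slices the two remaining texts on every step; B keeps the input strings immutable and advances two integer cursor offsets (t0 into target_text, o0 into original_text) in a flat while-loop, translating every slice/find to absolute positions via a shared _clamp helper, so no intermediate suffix strings are built while scanning.
import Mathlib
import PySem

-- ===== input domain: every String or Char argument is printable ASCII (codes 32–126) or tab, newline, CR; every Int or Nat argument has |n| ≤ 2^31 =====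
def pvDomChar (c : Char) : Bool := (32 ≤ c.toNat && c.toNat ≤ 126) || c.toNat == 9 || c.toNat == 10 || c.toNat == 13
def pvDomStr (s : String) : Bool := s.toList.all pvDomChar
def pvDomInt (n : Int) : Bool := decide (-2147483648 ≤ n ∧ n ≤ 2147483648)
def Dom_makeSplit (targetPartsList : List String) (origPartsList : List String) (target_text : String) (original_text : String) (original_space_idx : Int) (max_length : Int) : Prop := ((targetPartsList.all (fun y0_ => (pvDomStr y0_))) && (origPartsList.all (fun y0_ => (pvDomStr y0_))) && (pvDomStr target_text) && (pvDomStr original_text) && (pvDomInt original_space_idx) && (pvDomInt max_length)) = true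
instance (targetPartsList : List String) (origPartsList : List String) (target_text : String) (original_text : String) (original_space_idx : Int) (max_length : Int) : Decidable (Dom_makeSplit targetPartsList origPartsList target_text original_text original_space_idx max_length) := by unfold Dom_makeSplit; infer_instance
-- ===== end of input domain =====

-- B replaces A's repeated suffix-slicing recursion by a cursor-based loop: two integer
-- offsets into the two immutable input strings advance instead of re-slicing the remaining
-- texts at every step (objective: alternative algorithmic mechanism; avoids per-step copies).
-- Both Pythons mutate the two part-lists in place identically; the theorems are about the
-- returned tuple (which contains those lists).

-- ===== termination infrastructure (cited by the ports' decreasing_by) =====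

-- rank of the space index within a text of length n (progress of the find(' ', idx+1) chain)
def pvRank (n : Nat) (idx : Int) : Nat := n + 2 - (idx + 2).toNat

theorem pvFF_lb (s sub : List Char) (a : Int) : -1 ≤ PySem.Chars.findFrom s sub a none := by
  simp only [PySem.Chars.findFrom]
  generalize hst : (if a < 0 then (if a + (s.length:Int) < 0 then 0 else a + s.length) else a) = st
  have hst0 : 0 ≤ st := by rw [← hst]; split_ifs <;> omega
  have hr := PySem.Chars.neg_one_le_find (List.drop st.toNat (List.take ((s.length:Int)).toNat s)) sub
  generalize hg : (PySem.Chars.find (List.drop st.toNat (List.take ((s.length:Int)).toNat s)) sub) = r at hr ⊢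
  split_ifs <;> omega

theorem pvFF_spec (s sub : List Char) (a : Int) (hsub : sub ≠ [])
    (h : PySem.Chars.findFrom s sub a none ≠ -1) :
    0 ≤ PySem.Chars.findFrom s sub a none ∧
    PySem.Chars.findFrom s sub a none < s.length ∧
    (0 ≤ a → a ≤ PySem.Chars.findFrom s sub a none) := by
  revert h
  simp only [PySem.Chars.findFrom]
  generalize hst : (if a < 0 then (if a + (s.length:Int) < 0 then 0 else a + s.length) else a) = st
  have hst0 : 0 ≤ st := by rw [← hst]; split_ifs <;> omega
  have hsta : 0 ≤ a → a ≤ st := by intro ha; rw [← hst]; split_ifs <;> omega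
  clear hst
  intro h
  split_ifs at h ⊢ with h1 h2
  · omega
  · exact absurd rfl h
  · set l := List.drop st.toNat (List.take ((s.length:Int)).toNat s) with hl
    have hf0 : 0 ≤ PySem.Chars.find l sub := by
      have := PySem.Chars.neg_one_le_find l sub; omega
    have hlen : sub.length ≤ (l.drop (PySem.Chars.find l sub).toNat).length :=
      (PySem.Chars.find_spec hf0).1.length_le
    have hsub1 : 1 ≤ sub.length := by
      cases sub with
      | nil => exact absurd rfl hsub
      | cons x xs => simp
    have hll : l.length = s.length - st.toNat := by
      rw [hl]; simp [Int.toNat_natCast]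
    simp only [List.length_drop] at hlen
    clear hl
    generalize hr : PySem.Chars.find l sub = r at hf0 hlen ⊢
    generalize hll2 : l.length = L at hll hlen
    generalize hsl : sub.length = S at hlen hsub1
    obtain ⟨u, rfl⟩ := Int.eq_ofNat_of_zero_le hst0
    obtain ⟨v, rfl⟩ := Int.eq_ofNat_of_zero_le hf0
    simp only [Int.toNat_natCast] at hlen hll
    have hun : u ≤ s.length := by exact_mod_cast not_lt.mp h1
    have hmain : u + v < s.length := by clear h h1 h2 hsta hst0 hf0; omega
    refine ⟨by exact_mod_cast Int.natCast_nonneg (u + v), by exact_mod_cast hmain,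
      fun ha => by have := hsta ha; clear h h1 h2 hlen hll hun hmain; omega⟩

theorem pvRankArith1 (n a b : Nat) (h1 : a < n) (h2 : b + 1 ≤ a) :
    n + 2 - (a + 2) < n + 2 - (b + 2) := by omega

theorem pvRankArith2 (n a t : Nat) (hle : t ≤ 1) (h1 : a < n) :
    n + 2 - (a + 2) < n + 2 - t := by omega

theorem pvRank_lt (n : Nat) (idx idx' : Int) (h0 : 0 ≤ idx') (h1 : idx' < n)
    (h2 : 0 ≤ idx → idx + 1 ≤ idx') : pvRank n idx' < pvRank n idx := by
  unfold pvRank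
  obtain ⟨a, rfl⟩ := Int.eq_ofNat_of_zero_le h0
  have ha : ((a : Int) + 2).toNat = a + 2 := by exact_mod_cast rfl
  have h1' : a < n := by exact_mod_cast h1
  rw [ha]
  by_cases hp : 0 ≤ idx
  · obtain ⟨b, rfl⟩ := Int.eq_ofNat_of_zero_le hp
    have hb : ((b : Int) + 2).toNat = b + 2 := by exact_mod_cast rfl
    have h2' : b + 1 ≤ a := by exact_mod_cast h2 hp
    rw [hb]
    exact pvRankArith1 n a b h1' h2'
  · have hle : (idx + 2).toNat ≤ 1 := Int.toNat_le.mpr (by omega)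
    exact pvRankArith2 n a _ hle h1'

theorem pvRankArith3 (n t : Nat) (h : 1 ≤ t) : n + 2 - t ≤ n + 1 := by omega

theorem pvRank_le (n : Nat) (idx : Int) (h : -1 ≤ idx) : pvRank n idx ≤ n + 1 := by
  unfold pvRank
  have h1 : ((1 : Int)).toNat ≤ (idx + 2).toNat := Int.toNat_le_toNat (by omega)
  exact pvRankArith3 n _ h1

theorem pvRank_lt_top (n : Nat) (idx e : Int) (h2 : idx ≤ -2) (hlb : -1 ≤ e) :
    pvRank n e < pvRank n idx := by
  have h1 := pvRank_le n e hlb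
  have h3 : pvRank n idx = n + 2 := by
    unfold pvRank
    rw [Int.toNat_of_nonpos (by omega)]
    omega
  omega

theorem pvRank_top (n : Nat) (i : Int) (h : i ≤ -2) : pvRank n i = n + 2 := by
  unfold pvRank
  rw [Int.toNat_of_nonpos (by omega)]
  omega

theorem pvClamp_eq_zero (n : Nat) (k : Int) (h : PySem.List.clampIdx n k = 0) :
    k ≤ 0 ∨ n = 0 := by
  simp only [PySem.List.clampIdx] at h
  split_ifs at h <;> omega

theorem pvClamp_neg_one_window (n : Nat) (h : 6 ≤ n) :
    PySem.List.clampIdx n (-1 + 3) - PySem.List.clampIdx n (-1 - 3) = 0 := by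
  have h1 : ((-1 : Int) + 3) = 2 := by decide
  have h2 : ((-1 : Int) - 3) = -4 := by decide
  rw [h1, h2]
  have e1 : PySem.List.clampIdx n 2 = min 2 n := by
    simp only [PySem.List.clampIdx]
    rw [if_neg (by decide)]
    rfl
  have e2 : PySem.List.clampIdx n (-4) = n - 4 := by
    simp only [PySem.List.clampIdx]
    rw [if_pos (by decide), if_neg (by omega),
        show ((n : Int) + -4) = ((n : Nat) : Int) - ((4 : Nat) : Int) from by omega,
        Int.toNat_sub]
  rw [e1, e2]
  omega

-- decrease at a successful split of A: either the remaining original text shrinks, or (when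
-- the split index was far negative) its length is unchanged and the index rank drops
theorem pvDecFound (ot : String) (i ml : Int)
    (hslice : PySem.Str.len (PySem.Str.slice ot (some (i-3)) (some (i+3))) ≠ 0)
    (hlen : ¬ PySem.Str.len (PySem.Str.slice ot (some (i+1)) none) < 80) :
    (PySem.Str.slice ot (some (i+1)) none).toList.length < ot.toList.length ∨
    ((PySem.Str.slice ot (some (i+1)) none).toList.length = ot.toList.length ∧ i ≤ -2 ∧
     pvRank ot.toList.length
       (PySem.Str.findFrom (PySem.Str.slice ot (some (i+1)) none) " " ml)
       < pvRank ot.toList.length i) := by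
  have hts : (PySem.Str.slice ot (some (i-3)) (some (i+3))).toList.length
      = PySem.List.clampIdx ot.toList.length (i+3) - PySem.List.clampIdx ot.toList.length (i-3) := by
    simp [PySem.Str.toList_slice, PySem.Chars.slice_eq_listSlice, PySem.List.length_slice]
  have hds : (PySem.Str.slice ot (some (i+1)) none).toList.length
      = ot.toList.length - PySem.List.clampIdx ot.toList.length (i+1) := by
    simp [PySem.Str.toList_slice, PySem.Chars.slice_eq_listSlice, PySem.List.slice_some_none]
  rw [PySem.Str.len_eq, hts] at hslice
  rw [PySem.Str.len_eq, hds] at hlen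
  set n := ot.toList.length with hn
  set c := PySem.List.clampIdx n (i+1) with hc
  clear hts
  have hlen' : 80 ≤ n - c := by exact_mod_cast not_lt.mp hlen
  clear hlen
  have hn80 : c + 80 ≤ n := by clear hslice hds; omega
  by_cases hcz : 0 < c
  · left; rw [hds]; clear hslice hds; omega
  · right
    have hc0 : c = 0 := by clear hslice hds; omega
    have hi1 : i + 1 ≤ 0 := by
      rcases pvClamp_eq_zero n (i+1) hc0 with h | h
      · exact h
      · clear hslice hds; omega
    have hi2 : i ≤ -2 := by
      by_contra hcon
      have hie : i = -1 := by omega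
      subst hie
      exact hslice (by rw [pvClamp_neg_one_window n (by omega)]; simp)
    refine ⟨by rw [hds]; clear hslice hds; omega, hi2, ?_⟩
    have hlb : -1 ≤ PySem.Str.findFrom (PySem.Str.slice ot (some (i+1)) none) " " ml := by
      rw [PySem.Str.findFrom_eq]
      exact pvFF_lb _ _ _
    have h1 := pvRank_le n (PySem.Str.findFrom (PySem.Str.slice ot (some (i+1)) none) " " ml) hlb
    rw [pvRank_top n i hi2]
    clear hslice hds hlb
    omega


-- the two decreasing steps of makeSplit, as standalone theorems (cited by decreasing_by)
theorem makeSplitDecFound (tt ot : String) (i ml : Int)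
    (hfound : PySem.Str.find tt (PySem.Str.slice ot (some (i - 3)) (some (i + 3))) ≠ -1 ∧
      PySem.Str.find tt (PySem.Str.slice ot (some (i - 3)) (some (i + 3))) < i + 200 ∧
      PySem.Str.len (PySem.Str.slice ot (some (i - 3)) (some (i + 3))) ≠ 0)
    (hend : ¬ (PySem.Str.len (PySem.Str.slice ot (some (i + 1)) none) < 80 ∨
      PySem.Str.len (PySem.Str.slice tt (some (PySem.Str.find tt (PySem.Str.slice ot (some (i - 3)) (some (i + 3))) + 3 + 1)) none) < 80)) :
    Prod.Lex (· < ·) (· < ·)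
      ((PySem.Str.slice ot (some (i + 1)) none).toList.length,
        pvRank (PySem.Str.slice ot (some (i + 1)) none).toList.length
          (PySem.Str.findFrom (PySem.Str.slice ot (some (i + 1)) none) " " ml))
      (ot.toList.length, pvRank ot.toList.length i) := by
  rcases pvDecFound ot i ml hfound.2.2 (fun h => hend (Or.inl h)) with h | ⟨h1, _, h2⟩
  · exact Prod.Lex.left _ _ h
  · rw [h1]
    exact Prod.Lex.right _ h2

theorem makeSplitDecNil (ot : String) (i : Int)
    (hnil : ¬ PySem.Str.findFrom ot " " (i + 1) = -1) :
    Prod.Lex (· < ·) (· < ·)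
      (ot.toList.length, pvRank ot.toList.length (PySem.Str.findFrom ot " " (i + 1)))
      (ot.toList.length, pvRank ot.toList.length i) := by
  apply Prod.Lex.right
  have hs : (" " : String).toList ≠ [] := by decide
  have := pvFF_spec ot.toList (" " : String).toList (i + 1) hs
    (by rw [PySem.Str.findFrom_eq] at hnil; exact hnil)
  rw [PySem.Str.findFrom_eq]
  exact pvRank_lt _ _ _ this.1 this.2.1 (fun h => this.2.2 (by omega))

-- ===== PORT A ===== (literal transliteration of the Python A; list.append ≡ ++ [·])
def makeSplit (targetPartsList : List String) (origPartsList : List String) (target_text : String) (original_text : String) (original_space_idx : Int) (max_length : Int) : List String × List String × String × String × Int × Int :=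
  let original_slice := PySem.Str.slice original_text (some (original_space_idx - 3)) (some (original_space_idx + 3))
  let target_slice_idx := PySem.Str.find target_text original_slice
  if hfound : target_slice_idx ≠ -1 ∧ target_slice_idx < original_space_idx + 200 ∧ PySem.Str.len original_slice ≠ 0 then
    let target_space_idx := target_slice_idx + 3
    let targetPartsList' := targetPartsList ++ [PySem.Str.slice target_text none (some target_space_idx)]
    let origPartsList' := origPartsList ++ [PySem.Str.slice original_text none (some original_space_idx)]
    let target_text' := PySem.Str.slice target_text (some (target_space_idx + 1)) none
    let original_text' := PySem.Str.slice original_text (some (original_space_idx + 1)) none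
    if hend : PySem.Str.len original_text' < 80 ∨ PySem.Str.len target_text' < 80 then
      (targetPartsList' ++ [target_text'], origPartsList' ++ [original_text'], "", "", -1, max_length)
    else
      let new_space_idx := PySem.Str.findFrom original_text' " " max_length
      makeSplit targetPartsList' origPartsList' target_text' original_text' new_space_idx max_length
  else
    let idx_of_next_space := PySem.Str.findFrom original_text " " (original_space_idx + 1)
    if hnil : idx_of_next_space = -1 then
      (targetPartsList ++ [target_text], origPartsList ++ [original_text], target_text, original_text, idx_of_next_space, max_length)
    else
      makeSplit targetPartsList origPartsList target_text original_text idx_of_next_space max_length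
termination_by (original_text.toList.length, pvRank original_text.toList.length original_space_idx)
decreasing_by
  · exact makeSplitDecFound target_text original_text original_space_idx max_length hfound hend
  · exact makeSplitDecNil original_text original_space_idx hnil

-- ===== PORT B ===== (transliteration of Source B: cursor offsets t0/o0 into the immutable
-- input character lists; _clamp ↦ msClamp; Python slices with both endpoints already
-- normalised by _clamp to 0 ≤ lo ≤ hi ≤ length are EXACTLY take-then-drop;
-- str.find(sub, start) ↦ PySem.Chars.findFrom)

-- mirror of Source B's _clamp (Python slice-endpoint normalisation for a sequence of length m)
def msClamp (m k : Int) : Int :=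
  let k1 := if k < 0 then k + m else k
  if k1 < 0 then 0 else if m < k1 then m else k1

theorem msClamp_nonneg (m k : Int) (h : 0 ≤ m) : 0 ≤ msClamp m k := by
  simp only [msClamp]; split_ifs <;> omega

theorem msClamp_le (m k : Int) (h : 0 ≤ m) : msClamp m k ≤ m := by
  simp only [msClamp]; split_ifs <;> omega

theorem msClamp_of_bounds (m k : Int) (h0 : 0 ≤ k) (h1 : k ≤ m) : msClamp m k = k := by
  simp only [msClamp]; split_ifs <;> omega

-- small arithmetic steps of the termination proofs, factored out so the
-- omega certificates are built in tiny contexts (cited by the Dec lemmas)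
theorem pvArith_left (on o0 c : Int) (hpos : 0 < c) (hle : c ≤ on - o0) :
    (on - (o0 + c)).toNat < (on - o0).toNat := by omega

theorem pvArith_he (on o0 c : Int) (h : c = 0) :
    (on - (o0 + c)).toNat = (on - o0).toNat := by omega

theorem pvArith_sub_nonneg (on o0 c : Int) (h : c ≤ on - o0) : 0 ≤ on - (o0 + c) := by omega

theorem pvArith_add3_nonneg (a b c : Int) (h1 : 0 ≤ a) (h2 : 0 ≤ b) (h3 : 0 ≤ c) :
    0 ≤ a + b + c := by omega

theorem pvArith_add2_nonneg (a b : Int) (h1 : 0 ≤ a) (h2 : 0 ≤ b) : 0 ≤ a + b := by omega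

theorem pvArith_lb (F o0 c1 c2 : Int) (h : o0 + c1 + c2 ≤ F) (h2 : 0 ≤ c2) :
    -1 ≤ F - (o0 + c1) := by omega

theorem pvArith_lb2 (F o0 c1 : Int) (h : o0 + c1 ≤ F) (h2 : 0 ≤ c1) : 0 ≤ F - o0 := by omega

theorem pvArith_ub (F on o0 : Int) (lenO : Nat) (h : F < (lenO : Int)) (he : on = (lenO : Int))
    (h0 : 0 ≤ o0) : F - o0 < ((on - o0).toNat : Int) := by omega

theorem pvArith_step (F o0 c1 idx : Int) (hc : c1 = idx + 1) (h : o0 + c1 ≤ F) :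
    idx + 1 ≤ F - o0 := by omega

theorem msClamp_of_big (m k : Int) (h0 : 0 ≤ k) (h : m < k) : msClamp m k = m := by
  simp only [msClamp]; split_ifs <;> omega

theorem pvWindow_nil (O : List Char) (o0 m : Int) (h0 : 0 ≤ o0) (hm : 80 ≤ m) :
    (O.take (o0 + msClamp m (-1 + 3)).toNat).drop (o0 + msClamp m (-1 - 3)).toNat = [] := by
  have e1 : msClamp m (-1 + 3) = 2 := by
    rw [show ((-1 : Int) + 3) = 2 by norm_num]
    exact msClamp_of_bounds m 2 (by omega) (by omega)
  have e2 : msClamp m (-1 - 3) = m - 4 := by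
    rw [show ((-1 : Int) - 3) = -4 by norm_num]
    simp only [msClamp]; split_ifs <;> omega
  rw [e1, e2]
  apply List.drop_eq_nil_of_le
  have := List.length_take_le (o0 + 2).toNat O
  omega

-- find from start = length of a nonempty pattern is -1
theorem msFF_atLen (O sub : List Char) (hsub : sub ≠ []) :
    PySem.Chars.findFrom O sub ((O.length : Int)) none = -1 := by
  have hnn : ¬ ((O.length : Int) < 0) := by omega
  simp only [PySem.Chars.findFrom, if_neg hnn, Int.toNat_natCast, List.take_length,
    List.drop_length, lt_irrefl, if_false]
  have hfind : PySem.Chars.find [] sub = -1 := by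
    rw [PySem.Chars.find_eq_neg_one_iff]
    intro hin
    have := hin.sublist.length_le
    cases sub <;> simp_all
  rw [hfind]
  simp

-- at a successful split of B, either the o-cursor strictly advances, or the index was far
-- negative (so its rank drops while the cursor stays)
theorem msDecFound (O : List Char) (on o0 idx : Int)
    (h0 : 0 ≤ o0) (hle : o0 ≤ on) (hlen : on = (O.length : Int))
    (hne : (O.take (o0 + msClamp (on - o0) (idx + 3)).toNat).drop (o0 + msClamp (on - o0) (idx - 3)).toNat ≠ [])
    (hend : ¬ on - (o0 + msClamp (on - o0) (idx + 1)) < 80) :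
    0 < msClamp (on - o0) (idx + 1) ∨ (msClamp (on - o0) (idx + 1) = 0 ∧ idx ≤ -2) := by
  have hc := msClamp_le (on - o0) (idx + 1) (by omega)
  have hc0 := msClamp_nonneg (on - o0) (idx + 1) (by omega)
  have hm80 : 80 ≤ on - o0 := by omega
  by_cases hpos : 0 < msClamp (on - o0) (idx + 1)
  · exact Or.inl hpos
  · have hz : msClamp (on - o0) (idx + 1) = 0 := by omega
    right
    refine ⟨hz, ?_⟩
    by_contra hcon
    have hi : idx = -1 := by
      clear hne hend
      simp only [msClamp] at hz
      split_ifs at hz <;> omega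
    rw [hi] at hne
    exact hne (pvWindow_nil O o0 (on - o0) h0 hm80)

-- abbreviations for the values B computes in one iteration
def msPiece (O : List Char) (on o0 idx : Int) : List Char :=
  (O.take (o0 + msClamp (on - o0) (idx + 3)).toNat).drop (o0 + msClamp (on - o0) (idx - 3)).toNat

def msT (T O : List Char) (on t0 o0 idx : Int) : Int :=
  if PySem.Chars.findFrom T (msPiece O on o0 idx) t0 ≠ -1 then
    PySem.Chars.findFrom T (msPiece O on o0 idx) t0 - t0
  else -1


-- the two decreasing steps of msLoop, as standalone theorems (cited by decreasing_by)
theorem msLoopDecFound (T O : List Char) (tn on t0 o0 idx ml : Int)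
    (hinv : 0 ≤ t0 ∧ t0 ≤ tn ∧ tn = (T.length : Int) ∧ 0 ≤ o0 ∧ o0 ≤ on ∧ on = (O.length : Int))
    (hfound : msPiece O on o0 idx ≠ [] ∧ msT T O on t0 o0 idx ≠ -1 ∧ msT T O on t0 o0 idx < idx + 200)
    (hend : ¬ (on - (o0 + msClamp (on - o0) (idx + 1)) < 80 ∨ tn - (t0 + msClamp (tn - t0) (msT T O on t0 o0 idx + 4)) < 80)) :
    Prod.Lex (· < ·) (· < ·)
      ((on - (o0 + msClamp (on - o0) (idx + 1))).toNat,
        pvRank (on - (o0 + msClamp (on - o0) (idx + 1))).toNat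
          (if PySem.Chars.findFrom O [' '] ((o0 + msClamp (on - o0) (idx + 1)) + msClamp (on - (o0 + msClamp (on - o0) (idx + 1))) ml) ≠ -1 then
             PySem.Chars.findFrom O [' '] ((o0 + msClamp (on - o0) (idx + 1)) + msClamp (on - (o0 + msClamp (on - o0) (idx + 1))) ml) - (o0 + msClamp (on - o0) (idx + 1))
           else -1))
      ((on - o0).toNat, pvRank (on - o0).toNat idx) := by
  obtain ⟨ht0, htn, hTl, ho0, hon, hOl⟩ := hinv
  simp only [msPiece, msT] at hfound hend
  have hc1a := msClamp_nonneg (on - o0) (idx + 1) (by omega)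
  have hc1b := msClamp_le (on - o0) (idx + 1) (by omega)
  rcases msDecFound O on o0 idx ho0 hon hOl hfound.1 (fun h => hend (Or.inl h)) with h | ⟨h1, h2⟩
  · exact Prod.Lex.left _ _ (pvArith_left on o0 _ h hc1b)
  · rw [pvArith_he on o0 _ h1]
    apply Prod.Lex.right
    apply pvRank_lt_top _ _ _ h2
    split_ifs with hk
    · have hs : ([' '] : List Char) ≠ [] := by decide
      have hc2 := msClamp_nonneg (on - (o0 + msClamp (on - o0) (idx + 1))) ml
        (pvArith_sub_nonneg on o0 _ hc1b)
      have hsp := pvFF_spec O [' '] _ hs hk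
      exact pvArith_lb _ o0 _ _ (hsp.2.2 (pvArith_add3_nonneg o0 _ _ ho0 hc1a hc2)) hc2
    · exact le_refl (-1)

theorem msLoopDecNil (T O : List Char) (tn on t0 o0 idx : Int)
    (hinv : 0 ≤ t0 ∧ t0 ≤ tn ∧ tn = (T.length : Int) ∧ 0 ≤ o0 ∧ o0 ≤ on ∧ on = (O.length : Int))
    (hnil : ¬ (if PySem.Chars.findFrom O [' '] (o0 + msClamp (on - o0) (idx + 1)) ≠ -1 then PySem.Chars.findFrom O [' '] (o0 + msClamp (on - o0) (idx + 1)) - o0 else -1) = -1) :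
    Prod.Lex (· < ·) (· < ·)
      ((on - o0).toNat,
        pvRank (on - o0).toNat
          (if PySem.Chars.findFrom O [' '] (o0 + msClamp (on - o0) (idx + 1)) ≠ -1 then PySem.Chars.findFrom O [' '] (o0 + msClamp (on - o0) (idx + 1)) - o0 else -1))
      ((on - o0).toNat, pvRank (on - o0).toNat idx) := by
  obtain ⟨ht0, htn, hTl, ho0, hon, hOl⟩ := hinv
  apply Prod.Lex.right
  split_ifs at hnil ⊢ with hk
  · have hs : ([' '] : List Char) ≠ [] := by decide
    have hc0 := msClamp_nonneg (on - o0) (idx + 1) (by omega)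
    have hsp := pvFF_spec O [' '] (o0 + msClamp (on - o0) (idx + 1)) hs hk
    have hst := hsp.2.2 (pvArith_add2_nonneg o0 _ ho0 hc0)
    apply pvRank_lt
    · exact pvArith_lb2 _ o0 _ hst hc0
    · exact pvArith_ub _ on o0 O.length hsp.2.1 hOl ho0
    · intro hidx
      by_cases hbig : idx + 1 ≤ on - o0
      · exact pvArith_step _ o0 _ idx (msClamp_of_bounds (on - o0) (idx + 1) (by omega) hbig) hst
      · exfalso
        rw [msClamp_of_big (on - o0) (idx + 1) (by omega) (by omega)] at hk
        apply hk
        rw [show o0 + (on - o0) = ((O.length : Int)) from by omega]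
        exact msFF_atLen O [' '] hs
  · exact absurd rfl hnil

-- invariant preservation for one successful split (cited by msLoop's recursive call)
theorem msInvStep (T O : List Char) (tn on t0 o0 t idx : Int)
    (hinv : 0 ≤ t0 ∧ t0 ≤ tn ∧ tn = (T.length : Int) ∧ 0 ≤ o0 ∧ o0 ≤ on ∧ on = (O.length : Int)) :
    0 ≤ t0 + msClamp (tn - t0) (t + 4) ∧ t0 + msClamp (tn - t0) (t + 4) ≤ tn ∧ tn = (T.length : Int) ∧
    0 ≤ o0 + msClamp (on - o0) (idx + 1) ∧ o0 + msClamp (on - o0) (idx + 1) ≤ on ∧ on = (O.length : Int) := by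
  obtain ⟨h1, h2, h3, h4, h5, h6⟩ := hinv
  have a1 := msClamp_nonneg (tn - t0) (t + 4) (by omega)
  have a2 := msClamp_le (tn - t0) (t + 4) (by omega)
  have a3 := msClamp_nonneg (on - o0) (idx + 1) (by omega)
  have a4 := msClamp_le (on - o0) (idx + 1) (by omega)
  exact ⟨by omega, by omega, h3, by omega, by omega, h6⟩

theorem msInvInit (T O : List Char) :
    0 ≤ (0 : Int) ∧ (0 : Int) ≤ ((T.length : Nat) : Int) ∧ ((T.length : Nat) : Int) = (T.length : Int) ∧
    0 ≤ (0 : Int) ∧ (0 : Int) ≤ ((O.length : Nat) : Int) ∧ ((O.length : Nat) : Int) = (O.length : Int) :=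
  ⟨le_refl 0, Int.natCast_nonneg _, rfl, le_refl 0, Int.natCast_nonneg _, rfl⟩

def msLoop (T O : List Char) (tn on : Int) (tp op : List String)
    (t0 o0 idx ml : Int)
    (hinv : 0 ≤ t0 ∧ t0 ≤ tn ∧ tn = (T.length : Int) ∧ 0 ≤ o0 ∧ o0 ≤ on ∧ on = (O.length : Int)) :
    List String × List String × String × String × Int × Int :=
  let om := on - o0
  let lo := msClamp om (idx - 3)
  let hi := msClamp om (idx + 3)
  let piece := (O.take (o0 + hi).toNat).drop (o0 + lo).toNat
  let j := PySem.Chars.findFrom T piece t0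
  let t := if j ≠ -1 then j - t0 else -1
  if hfound : piece ≠ [] ∧ t ≠ -1 ∧ t < idx + 200 then
    let tp' := tp ++ [String.ofList ((T.take (t0 + msClamp (tn - t0) (t + 3)).toNat).drop t0.toNat)]
    let op' := op ++ [String.ofList ((O.take (o0 + msClamp om idx).toNat).drop o0.toNat)]
    let t0' := t0 + msClamp (tn - t0) (t + 4)
    let o0' := o0 + msClamp om (idx + 1)
    if hend : on - o0' < 80 ∨ tn - t0' < 80 then
      (tp' ++ [String.ofList (T.drop t0'.toNat)], op' ++ [String.ofList (O.drop o0'.toNat)], "", "", -1, ml)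
    else
      let k := PySem.Chars.findFrom O [' '] (o0' + msClamp (on - o0') ml)
      let idx' := if k ≠ -1 then k - o0' else -1
      msLoop T O tn on tp' op' t0' o0' idx' ml (msInvStep T O tn on t0 o0 t idx hinv)
  else
    let k := PySem.Chars.findFrom O [' '] (o0 + msClamp om (idx + 1))
    let nxt := if k ≠ -1 then k - o0 else -1
    if hnil : nxt = -1 then
      (tp ++ [String.ofList (T.drop t0.toNat)], op ++ [String.ofList (O.drop o0.toNat)],
       String.ofList (T.drop t0.toNat), String.ofList (O.drop o0.toNat), -1, ml)
    else
      msLoop T O tn on tp op t0 o0 nxt ml hinv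
termination_by ((on - o0).toNat, pvRank (on - o0).toNat idx)
decreasing_by
  · exact msLoopDecFound T O tn on t0 o0 idx ml hinv hfound hend
  · exact msLoopDecNil T O tn on t0 o0 idx hinv hnil

def makeSplit_alt (targetPartsList : List String) (origPartsList : List String) (target_text : String) (original_text : String) (original_space_idx : Int) (max_length : Int) : List String × List String × String × String × Int × Int :=
  msLoop target_text.toList original_text.toList
    ((target_text.toList.length : Int)) ((original_text.toList.length : Int))
    targetPartsList origPartsList 0 0 original_space_idx max_length (msInvInit target_text.toList original_text.toList)

-- ===== PRECONDITION & SPEC =====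
def Spec_makeSplit (targetPartsList : List String) (origPartsList : List String) (target_text : String) (original_text : String) (original_space_idx : Int) (max_length : Int) (out : List String × List String × String × String × Int × Int) : Prop := out = makeSplit_alt targetPartsList origPartsList target_text original_text original_space_idx max_length
instance (targetPartsList : List String) (origPartsList : List String) (target_text : String) (original_text : String) (original_space_idx : Int) (max_length : Int) (out : List String × List String × String × String × Int × Int) : Decidable (Spec_makeSplit targetPartsList origPartsList target_text original_text original_space_idx max_length out) := by unfold Spec_makeSplit; infer_instance

-- ===== CLAIM (what is proved, stated in full; the proofs are below) =====
def Claim_equal_makeSplit : Prop := ∀ (targetPartsList : List String) (origPartsList : List String) (target_text : String) (original_text : String) (original_space_idx : Int) (max_length : Int), Dom_makeSplit targetPartsList origPartsList target_text original_text original_space_idx max_length → Spec_makeSplit targetPartsList origPartsList target_text original_text original_space_idx max_length (makeSplit targetPartsList origPartsList target_text original_text original_space_idx max_length)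

-- ===== LEMMAS AND PROOFS =====

-- msClamp is clampIdx over a Nat length
theorem msClamp_eq_clampIdx (n : Nat) (k : Int) :
    msClamp ((n : Nat) : Int) k = ((PySem.List.clampIdx n k : Nat) : Int) := by
  simp only [msClamp, PySem.List.clampIdx]
  by_cases hk : k < 0 <;> simp only [hk, if_true, if_false] <;> split_ifs <;> omega

-- slices of a suffix, re-expressed on the full list
theorem msSliceShift (O : List Char) (o0 : Nat) (a b : Int) :
    PySem.List.slice (O.drop o0) (some a) (some b)
      = (O.take (o0 + PySem.List.clampIdx (O.drop o0).length b)).drop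
          (o0 + PySem.List.clampIdx (O.drop o0).length a) := by
  simp only [PySem.List.slice, List.drop_drop, List.take_drop]
  set ca := PySem.List.clampIdx (O.drop o0).length a with hca
  set cb := PySem.List.clampIdx (O.drop o0).length b with hcb
  by_cases hc : ca ≤ cb
  · rw [show (o0 + ca) + (cb - ca) = o0 + cb from by omega]
  · have e1 : List.drop (o0 + ca) (List.take (o0 + ca + (cb - ca)) O) = [] :=
      List.drop_eq_nil_of_le (le_trans (List.length_take_le _ _) (by omega))
    have e2 : List.drop (o0 + ca) (List.take (o0 + cb) O) = [] :=
      List.drop_eq_nil_of_le (le_trans (List.length_take_le _ _) (by omega))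
    rw [e1, e2]

theorem msSliceFrom (O : List Char) (o0 : Nat) (a : Int) :
    PySem.List.slice (O.drop o0) (some a) none
      = O.drop (o0 + PySem.List.clampIdx (O.drop o0).length a) := by
  simp only [PySem.List.slice, List.drop_drop]
  apply List.take_of_length_le
  have := PySem.List.clampIdx_le (O.drop o0).length a
  simp only [List.length_drop] at *
  omega

theorem msSliceTo (O : List Char) (o0 : Nat) (b : Int) :
    PySem.List.slice (O.drop o0) none (some b)
      = (O.take (o0 + PySem.List.clampIdx (O.drop o0).length b)).drop o0 := by
  simp only [PySem.List.slice, Nat.sub_zero, List.drop_zero, List.take_drop]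

theorem msFind_nil (sub : List Char) (hsub : sub ≠ []) :
    PySem.Chars.find [] sub = -1 := by
  rw [PySem.Chars.find_eq_neg_one_iff]
  intro hin
  have := hin.sublist.length_le
  cases sub <;> simp_all

-- str.find(sub) on a suffix equals the shifted str.find(sub, start) on the whole string
theorem msFindShift (T sub : List Char) (t0 : Nat) (ht : t0 ≤ T.length) :
    PySem.Chars.find (T.drop t0) sub
      = if PySem.Chars.findFrom T sub ((t0 : Nat) : Int) ≠ -1 then
          PySem.Chars.findFrom T sub ((t0 : Nat) : Int) - t0
        else -1 := by
  rw [PySem.Chars.findFrom_natCast T sub t0 ht]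
  have h0 := PySem.Chars.neg_one_le_find (T.drop t0) sub
  by_cases h : PySem.Chars.find (T.drop t0) sub = -1
  · simp [h]
  · rw [if_neg h]
    rw [if_pos (show ((t0 : Int) + PySem.Chars.find (List.drop t0 T) sub) ≠ -1 from by omega)]
    omega

-- str.find(sub, a) on a suffix equals the shifted clamped find on the whole string
theorem msFFShift (O sub : List Char) (hsub : sub ≠ []) (o0 : Nat) (ho : o0 ≤ O.length) (a : Int) :
    PySem.Chars.findFrom (O.drop o0) sub a none
      = if PySem.Chars.findFrom O sub (((o0 : Nat) : Int) + msClamp (((O.length : Nat) : Int) - o0) a) ≠ -1 then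
          PySem.Chars.findFrom O sub ((o0 : Int) + msClamp (((O.length : Nat) : Int) - o0) a) - o0
        else -1 := by
  have hm : (((O.length : Nat) : Int) - o0) = (((O.length - o0 : Nat) : Nat) : Int) := by omega
  rw [hm, msClamp_eq_clampIdx]
  set c : Nat := PySem.List.clampIdx (O.length - o0) a with hc
  have hcle : c ≤ O.length - o0 := hc ▸ PySem.List.clampIdx_le _ _
  have hoc : ((o0 : Int) + (c : Int)) = (((o0 + c : Nat) : Nat) : Int) := by push_cast; ring
  rw [hoc, PySem.Chars.findFrom_natCast O sub (o0 + c) (by omega)]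
  -- unfold the suffix-side findFrom
  conv_lhs => simp only [PySem.Chars.findFrom]
  simp only [List.length_drop, Int.toNat_natCast]
  rw [List.take_of_length_le (by simp)]
  set st : Int := if a < 0 then if a + ((O.length - o0 : Nat) : Int) < 0 then 0 else a + ((O.length - o0 : Nat) : Int) else a with hst
  have hst0 : 0 ≤ st := by rw [hst]; split_ifs <;> omega
  have hcval : (c : Int) = min st ((O.length - o0 : Nat) : Int) := by
    rw [hc, hst]; simp only [PySem.List.clampIdx]; split_ifs <;> omega
  by_cases hbig : ((O.length - o0 : Nat) : Int) < st
  · rw [if_pos hbig]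
    have hcm : (c : Int) = ((O.length - o0 : Nat) : Int) := by omega
    have hd : List.drop (o0 + c) O = [] := List.drop_eq_nil_of_le (by omega)
    rw [hd, msFind_nil sub hsub]
    simp
  · rw [if_neg hbig]
    have hcst : (c : Int) = st := by omega
    have hdd : List.drop st.toNat (List.drop o0 O) = List.drop (o0 + c) O := by
      rw [List.drop_drop]; congr 1; omega
    rw [hdd]
    have hr0 := PySem.Chars.neg_one_le_find (List.drop (o0 + c) O) sub
    by_cases hrneg : PySem.Chars.find (List.drop (o0 + c) O) sub = -1
    · simp only [if_pos hrneg]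
      norm_num
    · simp only [if_neg hrneg]
      rw [if_pos (show (((o0 + c : Nat) : Int) + PySem.Chars.find (List.drop (o0 + c) O) sub) ≠ -1 from by omega)]
      omega

-- bridges, stated for Int offsets as they appear in the loop state
theorem bridge_toNat (O : List Char) (on o0 a : Int)
    (h0 : 0 ≤ o0) (h1 : o0 ≤ on) (h2 : on = (O.length : Int)) :
    (o0 + msClamp (on - o0) a).toNat = o0.toNat + PySem.List.clampIdx (O.drop o0.toNat).length a := by
  have hm : on - o0 = (((O.drop o0.toNat).length : Nat) : Int) := by
    simp only [List.length_drop]; omega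
  rw [hm, msClamp_eq_clampIdx]
  omega

theorem bridge_slice (O : List Char) (on o0 a b : Int)
    (h0 : 0 ≤ o0) (h1 : o0 ≤ on) (h2 : on = (O.length : Int)) :
    (PySem.Str.slice (String.ofList (O.drop o0.toNat)) (some a) (some b)).toList
      = (O.take (o0 + msClamp (on - o0) b).toNat).drop (o0 + msClamp (on - o0) a).toNat := by
  rw [PySem.Str.toList_slice, PySem.Chars.slice_eq_listSlice, String.toList_ofList,
      msSliceShift O o0.toNat a b, bridge_toNat O on o0 a h0 h1 h2,
      bridge_toNat O on o0 b h0 h1 h2]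

theorem bridge_slice_to (O : List Char) (on o0 b : Int)
    (h0 : 0 ≤ o0) (h1 : o0 ≤ on) (h2 : on = (O.length : Int)) :
    PySem.Str.slice (String.ofList (O.drop o0.toNat)) none (some b)
      = String.ofList ((O.take (o0 + msClamp (on - o0) b).toNat).drop o0.toNat) := by
  rw [← String.ofList_toList (s := PySem.Str.slice _ none (some b))]
  congr 1
  rw [PySem.Str.toList_slice, PySem.Chars.slice_eq_listSlice, String.toList_ofList,
      msSliceTo O o0.toNat b, bridge_toNat O on o0 b h0 h1 h2]

theorem bridge_slice_from (O : List Char) (on o0 a : Int)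
    (h0 : 0 ≤ o0) (h1 : o0 ≤ on) (h2 : on = (O.length : Int)) :
    PySem.Str.slice (String.ofList (O.drop o0.toNat)) (some a) none
      = String.ofList (O.drop (o0 + msClamp (on - o0) a).toNat) := by
  rw [← String.ofList_toList (s := PySem.Str.slice _ (some a) none)]
  congr 1
  rw [PySem.Str.toList_slice, PySem.Chars.slice_eq_listSlice, String.toList_ofList,
      msSliceFrom O o0.toNat a, bridge_toNat O on o0 a h0 h1 h2]

theorem bridge_len_from (O : List Char) (on o0 a : Int)
    (h0 : 0 ≤ o0) (h1 : o0 ≤ on) (h2 : on = (O.length : Int)) :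
    PySem.Str.len (PySem.Str.slice (String.ofList (O.drop o0.toNat)) (some a) none)
      = on - (o0 + msClamp (on - o0) a) := by
  rw [bridge_slice_from O on o0 a h0 h1 h2, PySem.Str.len_eq, String.toList_ofList]
  simp only [List.length_drop]
  have hle := msClamp_le (on - o0) a (by omega)
  have hge := msClamp_nonneg (on - o0) a (by omega)
  omega

theorem bridge_piece (T O : List Char) (on o0 idx : Int)
    (h0 : 0 ≤ o0) (h1 : o0 ≤ on) (h2 : on = (O.length : Int)) :
    (PySem.Str.slice (String.ofList (O.drop o0.toNat)) (some (idx - 3)) (some (idx + 3))).toList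
      = msPiece O on o0 idx := by
  rw [bridge_slice O on o0 (idx - 3) (idx + 3) h0 h1 h2, msPiece]

theorem bridge_lenPiece (T O : List Char) (on o0 idx : Int)
    (h0 : 0 ≤ o0) (h1 : o0 ≤ on) (h2 : on = (O.length : Int)) :
    (PySem.Str.len (PySem.Str.slice (String.ofList (O.drop o0.toNat)) (some (idx - 3)) (some (idx + 3))) ≠ 0)
      ↔ msPiece O on o0 idx ≠ [] := by
  rw [PySem.Str.len_eq, bridge_piece T O on o0 idx h0 h1 h2]
  constructor
  · intro h hnil; rw [hnil] at h; simp at h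
  · intro h hz
    have : (msPiece O on o0 idx).length = 0 := by omega
    exact h (List.eq_nil_of_length_eq_zero this)

theorem bridge_findT (T O : List Char) (tn on t0 o0 idx : Int)
    (ht0 : 0 ≤ t0) (ht1 : t0 ≤ tn) (ht2 : tn = (T.length : Int))
    (h0 : 0 ≤ o0) (h1 : o0 ≤ on) (h2 : on = (O.length : Int)) :
    PySem.Str.find (String.ofList (T.drop t0.toNat))
        (PySem.Str.slice (String.ofList (O.drop o0.toNat)) (some (idx - 3)) (some (idx + 3)))
      = msT T O on t0 o0 idx := by
  rw [PySem.Str.find_eq, String.toList_ofList, bridge_piece T O on o0 idx h0 h1 h2, msT]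
  rw [msFindShift T (msPiece O on o0 idx) t0.toNat (by omega)]
  have hcast : ((t0.toNat : Nat) : Int) = t0 := Int.toNat_of_nonneg ht0
  rw [hcast]

theorem bridge_ff (O : List Char) (on o0 a : Int)
    (h0 : 0 ≤ o0) (h1 : o0 ≤ on) (h2 : on = (O.length : Int)) :
    PySem.Str.findFrom (String.ofList (O.drop o0.toNat)) " " a
      = if PySem.Chars.findFrom O [' '] (o0 + msClamp (on - o0) a) ≠ -1 then
          PySem.Chars.findFrom O [' '] (o0 + msClamp (on - o0) a) - o0
        else -1 := by
  rw [PySem.Str.findFrom_eq, String.toList_ofList]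
  have hsp : (" " : String).toList = [' '] := by decide
  rw [hsp]
  rw [msFFShift O [' '] (by decide) o0.toNat (by omega) a]
  have hcast : ((o0.toNat : Nat) : Int) = o0 := Int.toNat_of_nonneg h0
  rw [hcast, show ((O.length : Int) - o0) = on - o0 from by omega]

-- one-step unfoldings of msLoop
theorem msLoop_found_end (T O : List Char) (tn on : Int) (tp op : List String)
    (t0 o0 idx ml : Int)
    (hinv : 0 ≤ t0 ∧ t0 ≤ tn ∧ tn = (T.length : Int) ∧ 0 ≤ o0 ∧ o0 ≤ on ∧ on = (O.length : Int))
    (hfound : msPiece O on o0 idx ≠ [] ∧ msT T O on t0 o0 idx ≠ -1 ∧ msT T O on t0 o0 idx < idx + 200)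
    (hend : on - (o0 + msClamp (on - o0) (idx + 1)) < 80 ∨ tn - (t0 + msClamp (tn - t0) (msT T O on t0 o0 idx + 4)) < 80) :
    msLoop T O tn on tp op t0 o0 idx ml hinv
      = (tp ++ [String.ofList ((T.take (t0 + msClamp (tn - t0) (msT T O on t0 o0 idx + 3)).toNat).drop t0.toNat)]
            ++ [String.ofList (T.drop (t0 + msClamp (tn - t0) (msT T O on t0 o0 idx + 4)).toNat)],
         op ++ [String.ofList ((O.take (o0 + msClamp (on - o0) idx).toNat).drop o0.toNat)]
            ++ [String.ofList (O.drop (o0 + msClamp (on - o0) (idx + 1)).toNat)],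
         "", "", -1, ml) := by
  simp only [msT, msPiece] at hfound hend
  rw [msLoop]
  simp only [dif_pos hfound, dif_pos hend, msT, msPiece]

theorem msLoop_found_go (T O : List Char) (tn on : Int) (tp op : List String)
    (t0 o0 idx ml : Int)
    (hinv : 0 ≤ t0 ∧ t0 ≤ tn ∧ tn = (T.length : Int) ∧ 0 ≤ o0 ∧ o0 ≤ on ∧ on = (O.length : Int))
    (hinv' : 0 ≤ t0 + msClamp (tn - t0) (msT T O on t0 o0 idx + 4) ∧ t0 + msClamp (tn - t0) (msT T O on t0 o0 idx + 4) ≤ tn ∧ tn = (T.length : Int) ∧ 0 ≤ o0 + msClamp (on - o0) (idx + 1) ∧ o0 + msClamp (on - o0) (idx + 1) ≤ on ∧ on = (O.length : Int))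
    (hfound : msPiece O on o0 idx ≠ [] ∧ msT T O on t0 o0 idx ≠ -1 ∧ msT T O on t0 o0 idx < idx + 200)
    (hend : ¬ (on - (o0 + msClamp (on - o0) (idx + 1)) < 80 ∨ tn - (t0 + msClamp (tn - t0) (msT T O on t0 o0 idx + 4)) < 80)) :
    msLoop T O tn on tp op t0 o0 idx ml hinv
      = msLoop T O tn on
          (tp ++ [String.ofList ((T.take (t0 + msClamp (tn - t0) (msT T O on t0 o0 idx + 3)).toNat).drop t0.toNat)])
          (op ++ [String.ofList ((O.take (o0 + msClamp (on - o0) idx).toNat).drop o0.toNat)])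
          (t0 + msClamp (tn - t0) (msT T O on t0 o0 idx + 4))
          (o0 + msClamp (on - o0) (idx + 1))
          (if PySem.Chars.findFrom O [' '] ((o0 + msClamp (on - o0) (idx + 1)) + msClamp (on - (o0 + msClamp (on - o0) (idx + 1))) ml) ≠ -1 then
             PySem.Chars.findFrom O [' '] ((o0 + msClamp (on - o0) (idx + 1)) + msClamp (on - (o0 + msClamp (on - o0) (idx + 1))) ml) - (o0 + msClamp (on - o0) (idx + 1))
           else -1)
          ml hinv' := by
  simp only [msT, msPiece] at hfound hend
  conv_lhs => rw [msLoop]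
  simp only [dif_pos hfound, dif_neg hend, msT, msPiece]

theorem msLoop_nil (T O : List Char) (tn on : Int) (tp op : List String)
    (t0 o0 idx ml : Int)
    (hinv : 0 ≤ t0 ∧ t0 ≤ tn ∧ tn = (T.length : Int) ∧ 0 ≤ o0 ∧ o0 ≤ on ∧ on = (O.length : Int))
    (hfound : ¬ (msPiece O on o0 idx ≠ [] ∧ msT T O on t0 o0 idx ≠ -1 ∧ msT T O on t0 o0 idx < idx + 200))
    (hnil : (if PySem.Chars.findFrom O [' '] (o0 + msClamp (on - o0) (idx + 1)) ≠ -1 then PySem.Chars.findFrom O [' '] (o0 + msClamp (on - o0) (idx + 1)) - o0 else -1) = -1) :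
    msLoop T O tn on tp op t0 o0 idx ml hinv
      = (tp ++ [String.ofList (T.drop t0.toNat)], op ++ [String.ofList (O.drop o0.toNat)],
         String.ofList (T.drop t0.toNat), String.ofList (O.drop o0.toNat), -1, ml) := by
  simp only [msT, msPiece] at hfound hnil
  rw [msLoop]
  simp only [dif_neg hfound, dif_pos hnil]

theorem msLoop_go (T O : List Char) (tn on : Int) (tp op : List String)
    (t0 o0 idx ml : Int)
    (hinv : 0 ≤ t0 ∧ t0 ≤ tn ∧ tn = (T.length : Int) ∧ 0 ≤ o0 ∧ o0 ≤ on ∧ on = (O.length : Int))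
    (hfound : ¬ (msPiece O on o0 idx ≠ [] ∧ msT T O on t0 o0 idx ≠ -1 ∧ msT T O on t0 o0 idx < idx + 200))
    (hnil : ¬ (if PySem.Chars.findFrom O [' '] (o0 + msClamp (on - o0) (idx + 1)) ≠ -1 then PySem.Chars.findFrom O [' '] (o0 + msClamp (on - o0) (idx + 1)) - o0 else -1) = -1) :
    msLoop T O tn on tp op t0 o0 idx ml hinv
      = msLoop T O tn on tp op t0 o0
          (if PySem.Chars.findFrom O [' '] (o0 + msClamp (on - o0) (idx + 1)) ≠ -1 then PySem.Chars.findFrom O [' '] (o0 + msClamp (on - o0) (idx + 1)) - o0 else -1)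
          ml hinv := by
  simp only [msT, msPiece] at hfound hnil
  conv_lhs => rw [msLoop]
  simp only [dif_neg hfound, dif_neg hnil]

-- one-step unfoldings of makeSplit (A), in the Str world
theorem makeSplit_found_end (tp op : List String) (tt ot : String) (osi ml : Int)
    (hcond : PySem.Str.find tt (PySem.Str.slice ot (some (osi - 3)) (some (osi + 3))) ≠ -1 ∧
      PySem.Str.find tt (PySem.Str.slice ot (some (osi - 3)) (some (osi + 3))) < osi + 200 ∧
      PySem.Str.len (PySem.Str.slice ot (some (osi - 3)) (some (osi + 3))) ≠ 0)
    (hend : PySem.Str.len (PySem.Str.slice ot (some (osi + 1)) none) < 80 ∨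
      PySem.Str.len (PySem.Str.slice tt (some (PySem.Str.find tt (PySem.Str.slice ot (some (osi - 3)) (some (osi + 3))) + 3 + 1)) none) < 80) :
    makeSplit tp op tt ot osi ml
      = (tp ++ [PySem.Str.slice tt none (some (PySem.Str.find tt (PySem.Str.slice ot (some (osi - 3)) (some (osi + 3))) + 3))]
            ++ [PySem.Str.slice tt (some (PySem.Str.find tt (PySem.Str.slice ot (some (osi - 3)) (some (osi + 3))) + 3 + 1)) none],
         op ++ [PySem.Str.slice ot none (some osi)] ++ [PySem.Str.slice ot (some (osi + 1)) none],
         "", "", -1, ml) := by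
  rw [makeSplit]
  simp only [dif_pos hcond, dif_pos hend]

theorem makeSplit_found_go (tp op : List String) (tt ot : String) (osi ml : Int)
    (hcond : PySem.Str.find tt (PySem.Str.slice ot (some (osi - 3)) (some (osi + 3))) ≠ -1 ∧
      PySem.Str.find tt (PySem.Str.slice ot (some (osi - 3)) (some (osi + 3))) < osi + 200 ∧
      PySem.Str.len (PySem.Str.slice ot (some (osi - 3)) (some (osi + 3))) ≠ 0)
    (hend : ¬ (PySem.Str.len (PySem.Str.slice ot (some (osi + 1)) none) < 80 ∨
      PySem.Str.len (PySem.Str.slice tt (some (PySem.Str.find tt (PySem.Str.slice ot (some (osi - 3)) (some (osi + 3))) + 3 + 1)) none) < 80)) :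
    makeSplit tp op tt ot osi ml
      = makeSplit
          (tp ++ [PySem.Str.slice tt none (some (PySem.Str.find tt (PySem.Str.slice ot (some (osi - 3)) (some (osi + 3))) + 3))])
          (op ++ [PySem.Str.slice ot none (some osi)])
          (PySem.Str.slice tt (some (PySem.Str.find tt (PySem.Str.slice ot (some (osi - 3)) (some (osi + 3))) + 3 + 1)) none)
          (PySem.Str.slice ot (some (osi + 1)) none)
          (PySem.Str.findFrom (PySem.Str.slice ot (some (osi + 1)) none) " " ml) ml := by
  conv_lhs => rw [makeSplit]
  simp only [dif_pos hcond, dif_neg hend]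

theorem makeSplit_nil (tp op : List String) (tt ot : String) (osi ml : Int)
    (hcond : ¬ (PySem.Str.find tt (PySem.Str.slice ot (some (osi - 3)) (some (osi + 3))) ≠ -1 ∧
      PySem.Str.find tt (PySem.Str.slice ot (some (osi - 3)) (some (osi + 3))) < osi + 200 ∧
      PySem.Str.len (PySem.Str.slice ot (some (osi - 3)) (some (osi + 3))) ≠ 0))
    (hnil : PySem.Str.findFrom ot " " (osi + 1) = -1) :
    makeSplit tp op tt ot osi ml
      = (tp ++ [tt], op ++ [ot], tt, ot, PySem.Str.findFrom ot " " (osi + 1), ml) := by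
  rw [makeSplit]
  simp only [dif_neg hcond, dif_pos hnil]

theorem makeSplit_go (tp op : List String) (tt ot : String) (osi ml : Int)
    (hcond : ¬ (PySem.Str.find tt (PySem.Str.slice ot (some (osi - 3)) (some (osi + 3))) ≠ -1 ∧
      PySem.Str.find tt (PySem.Str.slice ot (some (osi - 3)) (some (osi + 3))) < osi + 200 ∧
      PySem.Str.len (PySem.Str.slice ot (some (osi - 3)) (some (osi + 3))) ≠ 0))
    (hnil : ¬ PySem.Str.findFrom ot " " (osi + 1) = -1) :
    makeSplit tp op tt ot osi ml
      = makeSplit tp op tt ot (PySem.Str.findFrom ot " " (osi + 1)) ml := by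
  conv_lhs => rw [makeSplit]
  simp only [dif_neg hcond, dif_neg hnil]

theorem main_eq (T O : List Char) (tn on : Int) (tp op : List String)
    (t0 o0 idx ml : Int)
    (hinv : 0 ≤ t0 ∧ t0 ≤ tn ∧ tn = (T.length : Int) ∧ 0 ≤ o0 ∧ o0 ≤ on ∧ on = (O.length : Int)) :
    msLoop T O tn on tp op t0 o0 idx ml hinv
      = makeSplit tp op (String.ofList (T.drop t0.toNat)) (String.ofList (O.drop o0.toNat)) idx ml := by
  induction tp, op, t0, o0, idx, hinv using msLoop.induct T O tn on ml with
  | case1 tp op t0 o0 idx hinv om lo hi piece j t hfound t0' o0' hend =>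
      obtain ⟨ht0, htn, hTl, ho0, hon, hOl⟩ := id hinv
      simp only [t, j, piece, hi, lo, om, t0', o0'] at hfound hend
      have hfindA := bridge_findT T O tn on t0 o0 idx ht0 htn hTl ho0 hon hOl
      have hlenA := bridge_lenPiece T O on o0 idx ho0 hon hOl
      have hfoundP : msPiece O on o0 idx ≠ [] ∧ msT T O on t0 o0 idx ≠ -1 ∧ msT T O on t0 o0 idx < idx + 200 := by
        simp only [msPiece, msT]; exact hfound
      have hendP : on - (o0 + msClamp (on - o0) (idx + 1)) < 80 ∨ tn - (t0 + msClamp (tn - t0) (msT T O on t0 o0 idx + 4)) < 80 := by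
        simp only [msPiece, msT]; exact hend
      rw [msLoop_found_end T O tn on tp op t0 o0 idx ml hinv hfoundP hendP]
      have condA : PySem.Str.find (String.ofList (T.drop t0.toNat)) (PySem.Str.slice (String.ofList (O.drop o0.toNat)) (some (idx - 3)) (some (idx + 3))) ≠ -1 ∧
          PySem.Str.find (String.ofList (T.drop t0.toNat)) (PySem.Str.slice (String.ofList (O.drop o0.toNat)) (some (idx - 3)) (some (idx + 3))) < idx + 200 ∧
          PySem.Str.len (PySem.Str.slice (String.ofList (O.drop o0.toNat)) (some (idx - 3)) (some (idx + 3))) ≠ 0 := by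
        rw [hfindA, hlenA]
        exact ⟨hfoundP.2.1, hfoundP.2.2, hfoundP.1⟩
      have hendA : PySem.Str.len (PySem.Str.slice (String.ofList (O.drop o0.toNat)) (some (idx + 1)) none) < 80 ∨
          PySem.Str.len (PySem.Str.slice (String.ofList (T.drop t0.toNat)) (some (PySem.Str.find (String.ofList (T.drop t0.toNat)) (PySem.Str.slice (String.ofList (O.drop o0.toNat)) (some (idx - 3)) (some (idx + 3))) + 3 + 1)) none) < 80 := by
        rw [bridge_len_from O on o0 (idx + 1) ho0 hon hOl, hfindA,
            show msT T O on t0 o0 idx + 3 + 1 = msT T O on t0 o0 idx + 4 from by ring,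
            bridge_len_from T tn t0 (msT T O on t0 o0 idx + 4) ht0 htn hTl]
        exact hendP
      rw [makeSplit_found_end tp op (String.ofList (T.drop t0.toNat)) (String.ofList (O.drop o0.toNat)) idx ml condA hendA]
      rw [hfindA, show msT T O on t0 o0 idx + 3 + 1 = msT T O on t0 o0 idx + 4 from by ring,
          bridge_slice_to T tn t0 (msT T O on t0 o0 idx + 3) ht0 htn hTl,
          bridge_slice_from T tn t0 (msT T O on t0 o0 idx + 4) ht0 htn hTl,
          bridge_slice_to O on o0 idx ho0 hon hOl,
          bridge_slice_from O on o0 (idx + 1) ho0 hon hOl]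
  | case2 tp op t0 o0 idx hinv om lo hi piece j t hfound tp' op' t0' o0' hend k idx' ih =>
      obtain ⟨ht0, htn, hTl, ho0, hon, hOl⟩ := id hinv
      simp only [t, j, piece, hi, lo, om, t0', o0'] at hfound hend
      simp only [idx', k, t0', o0', tp', op', t, j, piece, hi, lo, om] at ih
      have hfindA := bridge_findT T O tn on t0 o0 idx ht0 htn hTl ho0 hon hOl
      have hlenA := bridge_lenPiece T O on o0 idx ho0 hon hOl
      have hfoundP : msPiece O on o0 idx ≠ [] ∧ msT T O on t0 o0 idx ≠ -1 ∧ msT T O on t0 o0 idx < idx + 200 := by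
        simp only [msPiece, msT]; exact hfound
      have hendP : ¬ (on - (o0 + msClamp (on - o0) (idx + 1)) < 80 ∨ tn - (t0 + msClamp (tn - t0) (msT T O on t0 o0 idx + 4)) < 80) := by
        simp only [msPiece, msT]; exact hend
      have hinv' : 0 ≤ t0 + msClamp (tn - t0) (msT T O on t0 o0 idx + 4) ∧ t0 + msClamp (tn - t0) (msT T O on t0 o0 idx + 4) ≤ tn ∧ tn = (T.length : Int) ∧ 0 ≤ o0 + msClamp (on - o0) (idx + 1) ∧ o0 + msClamp (on - o0) (idx + 1) ≤ on ∧ on = (O.length : Int) := by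
        have h1 := msClamp_nonneg (tn - t0) (msT T O on t0 o0 idx + 4) (by omega)
        have h2 := msClamp_le (tn - t0) (msT T O on t0 o0 idx + 4) (by omega)
        have h3 := msClamp_nonneg (on - o0) (idx + 1) (by omega)
        have h4 := msClamp_le (on - o0) (idx + 1) (by omega)
        refine ⟨by omega, by omega, hTl, by omega, by omega, hOl⟩
      rw [msLoop_found_go T O tn on tp op t0 o0 idx ml hinv hinv' hfoundP hendP]
      have condA : PySem.Str.find (String.ofList (T.drop t0.toNat)) (PySem.Str.slice (String.ofList (O.drop o0.toNat)) (some (idx - 3)) (some (idx + 3))) ≠ -1 ∧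
          PySem.Str.find (String.ofList (T.drop t0.toNat)) (PySem.Str.slice (String.ofList (O.drop o0.toNat)) (some (idx - 3)) (some (idx + 3))) < idx + 200 ∧
          PySem.Str.len (PySem.Str.slice (String.ofList (O.drop o0.toNat)) (some (idx - 3)) (some (idx + 3))) ≠ 0 := by
        rw [hfindA, hlenA]
        exact ⟨hfoundP.2.1, hfoundP.2.2, hfoundP.1⟩
      have hendA : ¬ (PySem.Str.len (PySem.Str.slice (String.ofList (O.drop o0.toNat)) (some (idx + 1)) none) < 80 ∨
          PySem.Str.len (PySem.Str.slice (String.ofList (T.drop t0.toNat)) (some (PySem.Str.find (String.ofList (T.drop t0.toNat)) (PySem.Str.slice (String.ofList (O.drop o0.toNat)) (some (idx - 3)) (some (idx + 3))) + 3 + 1)) none) < 80) := by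
        rw [bridge_len_from O on o0 (idx + 1) ho0 hon hOl, hfindA,
            show msT T O on t0 o0 idx + 3 + 1 = msT T O on t0 o0 idx + 4 from by ring,
            bridge_len_from T tn t0 (msT T O on t0 o0 idx + 4) ht0 htn hTl]
        exact hendP
      rw [makeSplit_found_go tp op (String.ofList (T.drop t0.toNat)) (String.ofList (O.drop o0.toNat)) idx ml condA hendA]
      rw [hfindA, show msT T O on t0 o0 idx + 3 + 1 = msT T O on t0 o0 idx + 4 from by ring,
          bridge_slice_to T tn t0 (msT T O on t0 o0 idx + 3) ht0 htn hTl,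
          bridge_slice_from T tn t0 (msT T O on t0 o0 idx + 4) ht0 htn hTl,
          bridge_slice_to O on o0 idx ho0 hon hOl,
          bridge_slice_from O on o0 (idx + 1) ho0 hon hOl,
          bridge_ff O on (o0 + msClamp (on - o0) (idx + 1)) ml (by
            have := msClamp_nonneg (on - o0) (idx + 1) (by omega); omega) (by
            have := msClamp_le (on - o0) (idx + 1) (by omega); omega) hOl]
      exact ih
  | case3 tp op t0 o0 idx hinv om lo hi piece j t hfound k nxt hnil =>
      obtain ⟨ht0, htn, hTl, ho0, hon, hOl⟩ := id hinv
      simp only [t, j, piece, hi, lo, om] at hfound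
      simp only [nxt, k, om] at hnil
      have hfindA := bridge_findT T O tn on t0 o0 idx ht0 htn hTl ho0 hon hOl
      have hlenA := bridge_lenPiece T O on o0 idx ho0 hon hOl
      have hfoundP : ¬ (msPiece O on o0 idx ≠ [] ∧ msT T O on t0 o0 idx ≠ -1 ∧ msT T O on t0 o0 idx < idx + 200) := by
        simp only [msPiece, msT]; exact hfound
      have hnilP : (if PySem.Chars.findFrom O [' '] (o0 + msClamp (on - o0) (idx + 1)) ≠ -1 then PySem.Chars.findFrom O [' '] (o0 + msClamp (on - o0) (idx + 1)) - o0 else -1) = -1 := hnil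
      rw [msLoop_nil T O tn on tp op t0 o0 idx ml hinv hfoundP hnilP]
      have condA : ¬ (PySem.Str.find (String.ofList (T.drop t0.toNat)) (PySem.Str.slice (String.ofList (O.drop o0.toNat)) (some (idx - 3)) (some (idx + 3))) ≠ -1 ∧
          PySem.Str.find (String.ofList (T.drop t0.toNat)) (PySem.Str.slice (String.ofList (O.drop o0.toNat)) (some (idx - 3)) (some (idx + 3))) < idx + 200 ∧
          PySem.Str.len (PySem.Str.slice (String.ofList (O.drop o0.toNat)) (some (idx - 3)) (some (idx + 3))) ≠ 0) := by
        rw [hfindA, hlenA]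
        intro hco
        exact hfoundP ⟨hco.2.2, hco.1, hco.2.1⟩
      have nilA : PySem.Str.findFrom (String.ofList (O.drop o0.toNat)) " " (idx + 1) = -1 := by
        rw [bridge_ff O on o0 (idx + 1) ho0 hon hOl]
        exact hnilP
      rw [makeSplit_nil tp op (String.ofList (T.drop t0.toNat)) (String.ofList (O.drop o0.toNat)) idx ml condA nilA, nilA]
  | case4 tp op t0 o0 idx hinv om lo hi piece j t hfound k nxt hnil ih =>
      obtain ⟨ht0, htn, hTl, ho0, hon, hOl⟩ := id hinv
      simp only [t, j, piece, hi, lo, om] at hfound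
      simp only [nxt, k, om] at hnil ih
      have hfindA := bridge_findT T O tn on t0 o0 idx ht0 htn hTl ho0 hon hOl
      have hlenA := bridge_lenPiece T O on o0 idx ho0 hon hOl
      have hfoundP : ¬ (msPiece O on o0 idx ≠ [] ∧ msT T O on t0 o0 idx ≠ -1 ∧ msT T O on t0 o0 idx < idx + 200) := by
        simp only [msPiece, msT]; exact hfound
      rw [msLoop_go T O tn on tp op t0 o0 idx ml hinv hfoundP hnil]
      have condA : ¬ (PySem.Str.find (String.ofList (T.drop t0.toNat)) (PySem.Str.slice (String.ofList (O.drop o0.toNat)) (some (idx - 3)) (some (idx + 3))) ≠ -1 ∧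
          PySem.Str.find (String.ofList (T.drop t0.toNat)) (PySem.Str.slice (String.ofList (O.drop o0.toNat)) (some (idx - 3)) (some (idx + 3))) < idx + 200 ∧
          PySem.Str.len (PySem.Str.slice (String.ofList (O.drop o0.toNat)) (some (idx - 3)) (some (idx + 3))) ≠ 0) := by
        rw [hfindA, hlenA]
        intro hco
        exact hfoundP ⟨hco.2.2, hco.1, hco.2.1⟩
      have nilA : ¬ PySem.Str.findFrom (String.ofList (O.drop o0.toNat)) " " (idx + 1) = -1 := by
        rw [bridge_ff O on o0 (idx + 1) ho0 hon hOl]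
        exact hnil
      rw [makeSplit_go tp op (String.ofList (T.drop t0.toNat)) (String.ofList (O.drop o0.toNat)) idx ml condA nilA,
          bridge_ff O on o0 (idx + 1) ho0 hon hOl]
      exact ih

-- ===== VERDICT (by name: the statement is the Claim_ definition above) =====
theorem makeSplit_spec : Claim_equal_makeSplit := by
  intro tp op tt ot osi ml _
  unfold Spec_makeSplit makeSplit_alt
  rw [main_eq]
  simp
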